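-- pv_equiv track=rewrite | github.com/nag2mani/ProblemSolving | Leetcode/POTD/feb_11_2024.py | cherryPickup
-- ===== SOURCE A (Python) =====
-- def cherryPickup(grid) -> int:
--     rows, cols = len(grid), len(grid[0])
--
--     # @lru_cache(None)
--     #why after adding above line take less time than not adding
--
--     def dp(row, col1, col2):
--         if row == rows:
--             return 0
--         cherries = grid[row][col1] + (grid[row][col2] if col1 != col2 else 0)
--         max_cherries = 0
--         for d1 in [-1, 0, 1]:
--             for d2 in [-1, 0, 1]:
--                 new_col1, new_col2 = col1 + d1, col2 + d2
--                 if 0 <= new_col1 < cols and 0 <= new_col2 < cols: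
--                     max_cherries = max(max_cherries, dp(row + 1, new_col1, new_col2))
--         return cherries + max_cherries
--
--     return dp(0, 0, cols - 1)
-- ===== SOURCE B (Python) =====
-- def cherryPickup(grid) -> int:
--     rows, cols = len(grid), len(grid[0])
--     # bottom-up DP: dp[c1][c2] = best cherries from the next row downward
--     dp = [[0] * cols for _ in range(cols)]
--     for row in range(rows - 1, -1, -1):
--         ndp = [[0] * cols for _ in range(cols)]
--         for c1 in range(cols):
--             for c2 in range(cols):
--                 cherries = grid[row][c1] + (grid[row][c2] if c1 != c2 else 0)
--                 best = 0
--                 for n1 in range(max(0, c1 - 1), min(cols, c1 + 2)):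
--                     for n2 in range(max(0, c2 - 1), min(cols, c2 + 2)):
--                         best = max(best, dp[n1][n2])
--                 ndp[c1][c2] = cherries + best
--         dp = ndp
--     return dp[0][cols - 1]
-- ===== Notes on version B (the rewrite author's own statement) =====
-- stated objective: faster
-- what changed: Replaced A's unmemoized exponential recursion over (row,col1,col2) with a bottom-up DP that keeps one cols x cols table per row and scans rows from the bottom up.
import Mathlib
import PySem

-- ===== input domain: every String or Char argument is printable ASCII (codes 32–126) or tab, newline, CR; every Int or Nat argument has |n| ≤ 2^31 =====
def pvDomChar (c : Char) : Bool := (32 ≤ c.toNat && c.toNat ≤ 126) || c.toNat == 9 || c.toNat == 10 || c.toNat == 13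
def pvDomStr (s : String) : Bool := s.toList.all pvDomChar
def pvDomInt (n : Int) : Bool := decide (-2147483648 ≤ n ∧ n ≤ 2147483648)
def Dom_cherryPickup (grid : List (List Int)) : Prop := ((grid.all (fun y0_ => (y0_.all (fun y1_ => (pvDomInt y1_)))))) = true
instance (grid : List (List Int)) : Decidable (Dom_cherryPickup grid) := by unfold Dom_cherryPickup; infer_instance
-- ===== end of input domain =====

-- B replaces A's unmemoized recursion over (row, col1, col2) by a bottom-up DP that
-- keeps one cols × cols table per row, scanning rows bottom-up (objective: faster).

-- ===== PORT A =====
-- Literal port of A's inner `dp` recursion. The base test `rows ≤ row` replaces Python's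
-- `row == rows` only to make the recursion structurally terminating; dp is only ever
-- reached with row ≤ rows, where the two tests coincide. Indexing uses getD: under
-- Pre_cherryPickup every access grid[row][c] (0 ≤ c < cols, row < rows) is in range,
-- exactly where Python A returns without an IndexError.
def dpA (grid : List (List Int)) (rows cols : Nat) (row col1 col2 : Nat) : Int :=
  if _hr : rows ≤ row then 0
  else
    let cherries : Int :=
      (grid.getD row []).getD col1 0 +
        (if col1 ≠ col2 then (grid.getD row []).getD col2 0 else 0)
    let maxCherries : Int :=
      [(-1 : Int), 0, 1].foldl (fun m1 d1 =>
        [(-1 : Int), 0, 1].foldl (fun m2 d2 =>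
          if 0 ≤ (col1 : Int) + d1 ∧ (col1 : Int) + d1 < (cols : Int) ∧
             0 ≤ (col2 : Int) + d2 ∧ (col2 : Int) + d2 < (cols : Int) then
            max m2 (dpA grid rows cols (row + 1) ((col1 : Int) + d1).toNat ((col2 : Int) + d2).toNat)
          else m2) m1) 0
    cherries + maxCherries
termination_by rows - row
decreasing_by omega

def cherryPickup (grid : List (List Int)) : Int :=
  let rows := grid.length
  let cols := (grid.headD []).length
  dpA grid rows cols 0 0 (cols - 1)

-- ===== PORT B =====
-- Port of Source B. dp tables are cols × cols lists of lists; tget is dp[i][j].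
-- Python's range(max(0, c-1), min(cols, c+2)) is List.range' (c-1) (min cols (c+2) - (c-1))
-- (truncated Nat subtraction supplies the max with 0).
def tget (t : List (List Int)) (i j : Nat) : Int := (t.getD i []).getD j 0

def bestB (dp : List (List Int)) (cols c1 c2 : Nat) : Int :=
  (List.range' (c1 - 1) (min cols (c1 + 2) - (c1 - 1))).foldl (fun m n1 =>
    (List.range' (c2 - 1) (min cols (c2 + 2) - (c2 - 1))).foldl (fun m2 n2 =>
      max m2 (tget dp n1 n2)) m) 0

def stepB (grid : List (List Int)) (cols : Nat) (dp : List (List Int)) (row : Nat) : List (List Int) :=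
  (List.range cols).map (fun c1 => (List.range cols).map (fun c2 =>
    ((grid.getD row []).getD c1 0 +
      (if c1 ≠ c2 then (grid.getD row []).getD c2 0 else 0)) + bestB dp cols c1 c2))

def cherryPickup_alt (grid : List (List Int)) : Int :=
  let rows := grid.length
  let cols := (grid.headD []).length
  let init : List (List Int) := List.replicate cols (List.replicate cols 0)
  let final := ((List.range rows).reverse).foldl (stepB grid cols) init
  tget final 0 (cols - 1)

-- ===== PRECONDITION & SPEC =====
-- Pre_ excludes exactly the inputs on which Python A raises IndexError: the empty grid,
-- an empty first row, and grids with a row shorter than the first row (grid[row][c] out of range).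
def Pre_cherryPickup (grid : List (List Int)) : Prop :=
  grid ≠ [] ∧ 1 ≤ (grid.headD []).length ∧ ∀ r ∈ grid, (grid.headD []).length ≤ r.length
instance (grid : List (List Int)) : Decidable (Pre_cherryPickup grid) := by unfold Pre_cherryPickup; infer_instance

def pvWitness_cherryPickup : List (List Int) := [[3, 1, 1], [2, 5, 1], [1, 5, 5], [2, 1, 1]]

def Spec_cherryPickup (grid : List (List Int)) (out : Int) : Prop := out = cherryPickup_alt grid
instance (grid : List (List Int)) (out : Int) : Decidable (Spec_cherryPickup grid out) := by unfold Spec_cherryPickup; infer_instance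

-- ===== CLAIM (what is proved, stated in full; the proofs are below) =====
def Claim_equal_cherryPickup : Prop := ∀ (grid : List (List Int)), Dom_cherryPickup grid → Pre_cherryPickup grid → Spec_cherryPickup grid (cherryPickup grid)

-- ===== LEMMAS AND PROOFS =====

-- A's guarded fold over the three column deltas equals a plain fold over the
-- neighbour index range B iterates over, for any in-range column c.
lemma fold1 (B : Int → Nat → Int) (m : Int) (c cols : Nat) (hc : c < cols) :
    [(-1 : Int), 0, 1].foldl (fun acc d =>
        if 0 ≤ (c : Int) + d ∧ (c : Int) + d < (cols : Int) then B acc ((c : Int) + d).toNat else acc) m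
      = (List.range' (c - 1) (min cols (c + 2) - (c - 1))).foldl B m := by
  have h1 : ((c : Int) + -1).toNat = c - 1 := by omega
  have h2 : ((c : Int) + 0).toNat = c := by omega
  have h3 : ((c : Int) + 1).toNat = c + 1 := by omega
  rcases Nat.eq_zero_or_pos c with rfl | hpos
  · by_cases h2c : 2 ≤ cols
    · have hlen : min cols (0 + 2) - (0 - 1) = 2 := by omega
      rw [hlen]
      simp only [List.foldl, List.range', h1, h2, h3]
      split_ifs <;> first | omega | rfl
    · have hc1 : cols = 1 := by omega
      subst hc1
      have hlen : min 1 (0 + 2) - (0 - 1) = 1 := by omega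
      rw [hlen]
      simp only [List.foldl, List.range', h1, h2, h3]
      split_ifs <;> first | omega | rfl
  · have e1 : c - 1 + 1 = c := by omega
    by_cases hhi : c + 2 ≤ cols
    · have hlen : min cols (c + 2) - (c - 1) = 3 := by omega
      rw [hlen]
      simp only [List.foldl, List.range', h1, h2, h3, e1]
      split_ifs <;> omega
    · have hlen : min cols (c + 2) - (c - 1) = 2 := by omega
      rw [hlen]
      simp only [List.foldl, List.range', h1, h2, h3, e1]
      split_ifs <;> omega

-- members of the neighbour range are in-range columns
lemma nbr_lt {n c cols : Nat} (h : n ∈ List.range' (c - 1) (min cols (c + 2) - (c - 1))) :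
    n < cols := by
  rcases List.mem_range'.1 h with ⟨i, hi, rfl⟩
  omega

-- one step of B's table recomputes one row of A's recursion
lemma step_cell (grid : List (List Int)) (rows cols row c1 c2 : Nat) (t : List (List Int))
    (hrow : row < rows) (hc1 : c1 < cols) (hc2 : c2 < cols)
    (ht : ∀ a b, a < cols → b < cols → tget t a b = dpA grid rows cols (row + 1) a b) :
    tget (stepB grid cols t row) c1 c2 = dpA grid rows cols row c1 c2 := by
  have hL : tget (stepB grid cols t row) c1 c2 =
      ((grid.getD row []).getD c1 0 +
        (if c1 ≠ c2 then (grid.getD row []).getD c2 0 else 0)) + bestB t cols c1 c2 := by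
    simp [tget, stepB, List.getD_eq_getElem?_getD, hc1, hc2]
  rw [hL]
  rw [dpA, dif_neg (by omega)]
  congr 1
  unfold bestB
  have inner_eq : ∀ (m1 d1 : Int),
      [(-1 : Int), 0, 1].foldl (fun m2 d2 =>
          if 0 ≤ (c1 : Int) + d1 ∧ (c1 : Int) + d1 < (cols : Int) ∧
             0 ≤ (c2 : Int) + d2 ∧ (c2 : Int) + d2 < (cols : Int) then
            max m2 (dpA grid rows cols (row + 1) ((c1 : Int) + d1).toNat ((c2 : Int) + d2).toNat)
          else m2) m1
      = if 0 ≤ (c1 : Int) + d1 ∧ (c1 : Int) + d1 < (cols : Int) then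
          [(-1 : Int), 0, 1].foldl (fun m2 d2 =>
            if 0 ≤ (c2 : Int) + d2 ∧ (c2 : Int) + d2 < (cols : Int) then
              max m2 (dpA grid rows cols (row + 1) ((c1 : Int) + d1).toNat ((c2 : Int) + d2).toNat)
            else m2) m1
        else m1 := by
    intro m1 d1
    by_cases h : 0 ≤ (c1 : Int) + d1 ∧ (c1 : Int) + d1 < (cols : Int)
    · rw [if_pos h]
      simp only [h.1, h.2, true_and]
    · rw [if_neg h]
      simp only [List.foldl]
      rw [if_neg (by tauto), if_neg (by tauto), if_neg (by tauto)]
  simp only [inner_eq]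
  rw [fold1 (fun acc n1 => [(-1 : Int), 0, 1].foldl (fun m2 d2 =>
        if 0 ≤ (c2 : Int) + d2 ∧ (c2 : Int) + d2 < (cols : Int) then
          max m2 (dpA grid rows cols (row + 1) n1 ((c2 : Int) + d2).toNat)
        else m2) acc) 0 c1 cols hc1]
  refine PySem.List.foldl_congr_mem _ _ _ _ ?_
  intro acc n1 h1mem
  rw [fold1 (fun m2 n2 => max m2 (dpA grid rows cols (row + 1) n1 n2)) acc c2 cols hc2]
  refine PySem.List.foldl_congr_mem _ _ _ _ ?_
  intro acc2 n2 h2mem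
  rw [ht n1 n2 (nbr_lt h1mem) (nbr_lt h2mem)]

-- folding B's step down the reversed row range reaches row 0
lemma loop_inv (grid : List (List Int)) (rows cols : Nat) :
    ∀ (m : Nat) (t : List (List Int)), m ≤ rows →
      (∀ a b, a < cols → b < cols → tget t a b = dpA grid rows cols m a b) →
      ∀ a b, a < cols → b < cols →
        tget (((List.range m).reverse).foldl (stepB grid cols) t) a b = dpA grid rows cols 0 a b := by
  intro m
  induction m with
  | zero => intro t _ ht a b ha hb; simpa using ht a b ha hb
  | succ m ih =>
    intro t hm ht a b ha hb
    have hrev : (List.range (m + 1)).reverse = m :: (List.range m).reverse := by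
      rw [List.range_succ, List.reverse_append]; rfl
    rw [hrev, List.foldl_cons]
    exact ih (stepB grid cols t m) (by omega)
      (fun a b ha hb => step_cell grid rows cols m a b t (by omega) ha hb ht) a b ha hb

-- the all-zero initial table is A's recursion at row = rows
lemma init_valid (grid : List (List Int)) (rows cols : Nat) :
    ∀ a b, a < cols → b < cols →
      tget (List.replicate cols (List.replicate cols (0 : Int))) a b = dpA grid rows cols rows a b := by
  intro a b ha hb
  rw [dpA, dif_pos (le_refl rows)]
  simp only [tget, List.getD, List.getElem?_replicate]
  split_ifs <;> simp

-- ===== VERDICT (by name: the statement is the Claim_ definition above) =====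
theorem cherryPickup_spec : Claim_equal_cherryPickup := by
  intro grid _ hpre
  obtain ⟨hne, hcols, _⟩ := hpre
  unfold Spec_cherryPickup cherryPickup cherryPickup_alt
  exact (loop_inv grid grid.length (grid.headD []).length grid.length
    (List.replicate _ (List.replicate _ 0)) (le_refl _)
    (init_valid grid _ _) 0 ((grid.headD []).length - 1) (by omega) (by omega)).symm
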